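-- pv_equiv track=rewrite | github.com/msmolej6/wdp | src/lista8/zadanie2.py | is_composable
-- ===== SOURCE A (Python) =====
-- from collections import defaultdict
--
-- def is_composable(target: str, word: str) -> bool:
--     word_dict = word_to_dict(word)
--
--     for ch in target:
--         if ch in word_dict and word_dict[ch] > 0:
--             word_dict[ch] -= 1
--         else:
--             return False
--
--     return True
--
-- def word_to_dict(word: str) -> dict[str, int]:
--     dictionary: dict[str, int] = defaultdict(int)
--
--     for ch in word:
--         dictionary[ch] += 1
--
--     return dictionary
-- ===== SOURCE B (Python) =====
-- from collections import Counter
--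
-- def is_composable(target: str, word: str) -> bool:
--     need = Counter(target)
--     have = Counter(word)
--     return all(need[ch] <= have[ch] for ch in need)
-- ===== Notes on version B (the rewrite author's own statement) =====
-- stated objective: idiomatic
-- what changed: Replaces the greedy decrement-with-early-exit loop over a single mutable dict by building two frequency tables (Counter) and comparing them as multisets with an all(...) over target's distinct characters.
import Mathlib
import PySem

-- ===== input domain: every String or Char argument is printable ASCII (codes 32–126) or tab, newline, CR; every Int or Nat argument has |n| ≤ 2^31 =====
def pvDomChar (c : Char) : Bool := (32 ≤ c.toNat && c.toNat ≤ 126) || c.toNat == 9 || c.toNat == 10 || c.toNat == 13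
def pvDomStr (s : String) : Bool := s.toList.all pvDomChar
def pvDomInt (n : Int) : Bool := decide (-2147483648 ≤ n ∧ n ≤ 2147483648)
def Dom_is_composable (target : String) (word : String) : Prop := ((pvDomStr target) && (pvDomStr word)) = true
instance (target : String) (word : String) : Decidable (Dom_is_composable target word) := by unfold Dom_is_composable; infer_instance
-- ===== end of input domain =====

-- B replaces A's greedy decrement-with-early-exit over one mutable dict by building
-- two frequency tables and comparing them as multisets (idiomatic; same cost).


-- ===== PORT A =====
def word_to_dict (word : String) : PySem.Dict Char Int :=
  word.toList.foldl (fun d ch => d.modify ch 0 (· + 1)) PySem.Dict.empty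

def isComposableLoop (d : PySem.Dict Char Int) : List Char → Bool
  | [] => true
  | ch :: rest =>
    if d.contains ch && decide (d.getD ch 0 > 0)
    then isComposableLoop (d.modify ch 0 (· - 1)) rest
    else false

def is_composable (target : String) (word : String) : Bool :=
  isComposableLoop (word_to_dict word) target.toList

-- ===== PORT B =====
def is_composable_alt (target : String) (word : String) : Bool :=
  let need := PySem.Dict.counter target.toList
  let hav := PySem.Dict.counter word.toList
  need.keys.all (fun ch => decide (need.getD ch 0 ≤ hav.getD ch 0))

-- ===== PRECONDITION & SPEC =====
def Spec_is_composable (target : String) (word : String) (out : Bool) : Prop := out = is_composable_alt target word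
instance (target : String) (word : String) (out : Bool) : Decidable (Spec_is_composable target word out) := by unfold Spec_is_composable; infer_instance

-- ===== CLAIM (what is proved, stated in full; the proofs are below) =====
def Claim_equal_is_composable : Prop := ∀ (target : String) (word : String), Dom_is_composable target word → Spec_is_composable target word (is_composable target word)

-- ===== LEMMAS AND PROOFS =====

-- A's loop condition is equivalent to a positive stored count.
lemma cond_iff (d : PySem.Dict Char Int) (ch : Char) :
    (d.contains ch && decide (d.getD ch 0 > 0)) = true ↔ 0 < d.getD ch 0 := by
  constructor
  · intro h
    simp only [Bool.and_eq_true, decide_eq_true_eq] at h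
    exact h.2
  · intro h
    by_cases hc : d.contains ch = true
    · simp [hc, h]
    · rw [PySem.Dict.getD_of_not_contains d 0 (by simpa using hc)] at h
      omega

-- Invariant of A's loop: it succeeds iff the remaining multiset fits in the dict counts.
lemma loop_iff (rest : List Char) (d : PySem.Dict Char Int)
    (hnn : ∀ c, 0 ≤ d.getD c 0) :
    isComposableLoop d rest = true ↔ ∀ c, (rest.count c : Int) ≤ d.getD c 0 := by
  induction rest generalizing d with
  | nil => simp [isComposableLoop, hnn]
  | cons ch rest ih =>
    by_cases hpos : 0 < d.getD ch 0
    · rw [isComposableLoop, if_pos ((cond_iff d ch).mpr hpos)]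
      rw [ih (d.modify ch 0 (· - 1)) (by
        intro c
        rw [PySem.Dict.getD_modify]
        split_ifs with h
        · subst h; omega
        · exact hnn c)]
      constructor
      · intro h c
        have := h c
        rw [PySem.Dict.getD_modify] at this
        by_cases hc : c = ch
        · subst hc
          rw [if_pos rfl] at this
          simp
          omega
        · rw [if_neg hc] at this
          rw [List.count_cons_of_ne (Ne.symm hc)]
          omega
      · intro h c
        have := h c
        rw [PySem.Dict.getD_modify]
        by_cases hc : c = ch
        · subst hc
          simp at this
          rw [if_pos rfl]
          omega
        · rw [if_neg hc]
          rw [List.count_cons_of_ne (Ne.symm hc)] at this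
          omega
    · rw [isComposableLoop, if_neg (by
        intro hcond
        exact hpos ((cond_iff d ch).mp hcond))]
      constructor
      · intro h; exact absurd h (by simp)
      · intro h
        have := h ch
        simp at this
        omega

-- the dict A builds stores exactly the letter counts of word
lemma word_to_dict_getD (word : String) (c : Char) :
    (word_to_dict word).getD c 0 = (word.toList.count c : Int) := by
  unfold word_to_dict
  rw [PySem.Dict.getD_foldl_modify_add_one]
  simp

lemma alt_iff (target word : String) :
    is_composable_alt target word = true ↔
      ∀ c, (target.toList.count c : Int) ≤ (word.toList.count c : Int) := by
  unfold is_composable_alt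
  simp only [List.all_eq_true, decide_eq_true_eq, PySem.Dict.keys_counter,
    PySem.Dict.getD_counter]
  constructor
  · intro h c
    by_cases hc : c ∈ target.toList
    · exact h c (by simpa [PySem.Set.mem_ofList] using hc)
    · simp [List.count_eq_zero_of_not_mem hc]
  · intro h c _
    exact h c

-- ===== VERDICT (by name: the statement is the Claim_ definition above) =====
theorem is_composable_spec : Claim_equal_is_composable := by
  intro target word _
  unfold Spec_is_composable
  rw [Bool.eq_iff_iff]
  unfold is_composable
  rw [loop_iff _ _ (fun c => by rw [word_to_dict_getD]; positivity), alt_iff]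
  constructor
  · intro h c; have := h c; rwa [word_to_dict_getD] at this
  · intro h c; rw [word_to_dict_getD]; exact h c
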